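-- pv_equiv track=rewrite | github.com/mohit-shrma/bioinfotools | biPartitePlot/coordsConverter.py | getIntersectionCountFromAdj
-- ===== SOURCE A (Python) =====
-- def isIntersect(y1, y2, y3, y4):
--     diff1 = y1- y3
--     diff2 = y2 - y4
--     if (diff1*diff2) >= 0:
--         #print 'not intersect: ', y1, y2, y3, y4
--         return False
--     else:
--         #print 'intersect: ', y1, y2, y3, y4
--         return True
--
-- def getIntersectionCountFromAdj(adjListA):
--     intersectionCount = 0
--     numLines = 0
--     for aNode in range(len(adjListA)):
--         for aNodeNeighbor in adjListA[aNode]: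
--             #check for intersection of line (aNode, aNodeNeighbor)
--             #end y coords of line
--             y1 = aNode
--             y2 = aNodeNeighbor
--             numLines += 1
--             for otherNode in range(aNode+1, len(adjListA)):
--                 for otherNeighbor in adjListA[otherNode]:
--                     #other line is (othernode, otherneighbor)
--                     y3 = otherNode
--                     y4 = otherNeighbor
--                     if isIntersect(y1, y2, y3, y4):
--                         intersectionCount += 1
--     return intersectionCount, numLines
-- ===== SOURCE B (Python) =====
-- def _sort_count(a):
--     # returns (sorted copy of a, number of inversion pairs i<j with a[i] > a[j])
--     if len(a) <= 1:
--         return a, 0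
--     mid = len(a) // 2
--     left, cl = _sort_count(a[:mid])
--     right, cr = _sort_count(a[mid:])
--     merged = []
--     cross = 0
--     i = 0
--     j = 0
--     while i < len(left) and j < len(right):
--         if left[i] <= right[j]:
--             merged.append(left[i])
--             i += 1
--         else:
--             cross += len(left) - i
--             merged.append(right[j])
--             j += 1
--     merged.extend(left[i:])
--     merged.extend(right[j:])
--     return merged, cl + cr + cross
--
-- def getIntersectionCountFromAdj(adjListA):
--     # An edge (a, y) crosses a later edge (o, z), a < o, iff y > z; so the answer
--     # is the number of inversions of the flattened neighbour sequence minus the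
--     # inversions occurring inside a single node's list.
--     flat = [y for nb in adjListA for y in nb]
--     total = _sort_count(flat)[1]
--     within = sum(_sort_count(nb)[1] for nb in adjListA)
--     return total - within, len(flat)
-- ===== Notes on version B (the rewrite author's own statement) =====
-- stated objective: faster
-- what changed: Replaced A's quadruple nested loop over all edge pairs by merge-sort inversion counting on the flattened neighbour sequence (total inversions minus within-node inversions), since for a < o two edges cross exactly when the earlier edge's neighbour exceeds the later one's.
import Mathlib
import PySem

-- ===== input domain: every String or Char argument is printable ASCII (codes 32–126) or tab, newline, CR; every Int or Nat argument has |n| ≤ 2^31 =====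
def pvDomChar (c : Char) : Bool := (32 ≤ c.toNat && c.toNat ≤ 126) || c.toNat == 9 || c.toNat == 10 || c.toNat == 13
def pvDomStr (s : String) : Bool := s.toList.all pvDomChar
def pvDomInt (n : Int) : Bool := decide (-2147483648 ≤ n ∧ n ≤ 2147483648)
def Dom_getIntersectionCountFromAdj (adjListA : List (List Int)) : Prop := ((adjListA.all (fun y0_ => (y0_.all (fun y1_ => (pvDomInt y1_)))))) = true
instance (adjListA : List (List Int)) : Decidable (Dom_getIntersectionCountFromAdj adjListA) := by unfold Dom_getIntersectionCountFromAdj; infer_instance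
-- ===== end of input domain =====

-- B replaces A's quadruple nested loop (O(E^2)) by merge-sort inversion counting on
-- the flattened neighbour sequence (O(E log E)); objective: faster.

-- ===== PORT A =====
def isIntersect (y1 y2 y3 y4 : Int) : Bool :=
  let diff1 := y1 - y3
  let diff2 := y2 - y4
  if diff1 * diff2 ≥ 0 then false else true

def getIntersectionCountFromAdj (adjListA : List (List Int)) : Int × Int :=
  (PySem.List.pyRange 0 (PySem.List.len adjListA) 1).foldl (fun st1 aNode =>
    (PySem.List.pyGetD adjListA aNode []).foldl (fun st2 aNodeNeighbor =>
      let y1 := aNode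
      let y2 := aNodeNeighbor
      let st3 : Int × Int := (st2.1, st2.2 + 1)
      (PySem.List.pyRange (aNode + 1) (PySem.List.len adjListA) 1).foldl (fun st4 otherNode =>
        (PySem.List.pyGetD adjListA otherNode []).foldl (fun st5 otherNeighbor =>
          let y3 := otherNode
          let y4 := otherNeighbor
          if isIntersect y1 y2 y3 y4 then (st5.1 + 1, st5.2) else st5) st4) st3) st1)
    ((0 : Int), (0 : Int))

-- ===== PORT B =====
-- the merge while-loop of Source B: state (remaining left, remaining right, merged, cross);
-- 'len(left) - i' is the length of the remaining left part
def mergeLoop : List Int → List Int → List Int → Int → List Int × Int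
  | x :: xs, y :: ys, merged, cross =>
    if x ≤ y then mergeLoop xs (y :: ys) (merged ++ [x]) cross
    else mergeLoop (x :: xs) ys (merged ++ [y]) (cross + ((x :: xs).length : Int))
  | left, right, merged, cross => (merged ++ left ++ right, cross)

def sortCount (a : List Int) : List Int × Int :=
  if _h : a.length ≤ 1 then (a, 0)
  else
    let mid := a.length / 2
    let lc := sortCount (a.take mid)
    let rc := sortCount (a.drop mid)
    let mc := mergeLoop lc.1 rc.1 [] 0
    (mc.1, lc.2 + rc.2 + mc.2)
termination_by a.length
decreasing_by
  · simp only [List.length_take]; omega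
  · simp only [List.length_drop]; omega

def getIntersectionCountFromAdj_alt (adjListA : List (List Int)) : Int × Int :=
  let flat := adjListA.flatMap (fun nb => nb)
  let total := (sortCount flat).2
  let within := (adjListA.map (fun nb => (sortCount nb).2)).sum
  (total - within, PySem.List.len flat)

-- ===== PRECONDITION & SPEC =====
def Spec_getIntersectionCountFromAdj (adjListA : List (List Int)) (out : Int × Int) : Prop := out = getIntersectionCountFromAdj_alt adjListA
instance (adjListA : List (List Int)) (out : Int × Int) : Decidable (Spec_getIntersectionCountFromAdj adjListA out) := by unfold Spec_getIntersectionCountFromAdj; infer_instance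

-- ===== CLAIM (what is proved, stated in full; the proofs are below) =====
def Claim_equal_getIntersectionCountFromAdj : Prop := ∀ (adjListA : List (List Int)), Dom_getIntersectionCountFromAdj adjListA → Spec_getIntersectionCountFromAdj adjListA (getIntersectionCountFromAdj adjListA)

-- ===== LEMMAS AND PROOFS =====

-- number of inversion pairs i < j with l[i] > l[j]
def inv : List Int → Nat
  | [] => 0
  | x :: xs => xs.countP (fun z => decide (z < x)) + inv xs

-- number of pairs (x ∈ l, z ∈ r) with z < x
def crossCnt (l r : List Int) : Nat :=
  (l.map (fun x => r.countP (fun z => decide (z < x)))).sum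

def refCount : List (List Int) → Nat
  | [] => 0
  | b :: bs => crossCnt b bs.flatten + refCount bs

theorem crossCnt_nil_left (r : List Int) : crossCnt [] r = 0 := rfl

theorem crossCnt_nil_right (l : List Int) : crossCnt l [] = 0 := by
  simp [crossCnt]

theorem crossCnt_cons_left (x : Int) (l r : List Int) :
    crossCnt (x :: l) r = r.countP (fun z => decide (z < x)) + crossCnt l r := by
  simp [crossCnt]

theorem crossCnt_cons_right (l : List Int) (y : Int) (r : List Int) :
    crossCnt l (y :: r) = l.countP (fun x => decide (y < x)) + crossCnt l r := by
  induction l with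
  | nil => rfl
  | cons x xs ih =>
    simp only [crossCnt_cons_left, ih, List.countP_cons]
    by_cases h : y < x <;> simp [h] <;> omega

theorem crossCnt_perm_left {l l' : List Int} (h : l.Perm l') (r : List Int) :
    crossCnt l r = crossCnt l' r := by
  unfold crossCnt
  exact (h.map _).sum_eq

theorem crossCnt_perm_right (l : List Int) {r r' : List Int} (h : r.Perm r') :
    crossCnt l r = crossCnt l r' := by
  unfold crossCnt
  congr 1
  exact List.map_congr_left (fun x _ => h.countP_eq _)

theorem inv_append (l1 l2 : List Int) :
    inv (l1 ++ l2) = inv l1 + inv l2 + crossCnt l1 l2 := by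
  induction l1 with
  | nil => simp [inv, crossCnt_nil_left]
  | cons x xs ih =>
    simp only [List.cons_append, inv, List.countP_append, ih, crossCnt_cons_left]
    omega

theorem mergeLoop_perm (l r m : List Int) (c : Int) :
    (mergeLoop l r m c).1.Perm (m ++ l ++ r) := by
  induction l, r, m, c using mergeLoop.induct with
  | case1 x xs y ys m c hxy ih =>
    rw [mergeLoop, if_pos hxy]
    refine ih.trans ?_
    simp [List.append_assoc]
  | case2 x xs y ys m c hxy ih =>
    rw [mergeLoop, if_neg hxy]
    refine ih.trans ?_
    have h1 : (m ++ [y]) ++ (x :: xs) ++ ys = m ++ (y :: ((x :: xs) ++ ys)) := by simp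
    have h2 : m ++ (x :: xs) ++ (y :: ys) = m ++ ((x :: xs) ++ (y :: ys)) := by simp
    rw [h1, h2]
    exact List.perm_middle.symm.append_left m
  | case3 left right m c h =>
    rw [mergeLoop.eq_def]
    split
    · exact (h _ _ _ _ rfl rfl).elim
    · exact List.Perm.refl _

theorem mergeLoop_sorted (l r m : List Int) (c : Int) :
    l.Pairwise (· ≤ ·) → r.Pairwise (· ≤ ·) → m.Pairwise (· ≤ ·) →
    (∀ z ∈ m, ∀ w, w ∈ l ∨ w ∈ r → z ≤ w) →
    (mergeLoop l r m c).1.Pairwise (· ≤ ·) := by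
  induction l, r, m, c using mergeLoop.induct with
  | case1 x xs y ys m c hxy ih =>
    intro hl hr hm hml
    rw [mergeLoop, if_pos hxy]
    apply ih (List.Pairwise.of_cons hl) hr
    · refine List.pairwise_append.mpr ⟨hm, List.pairwise_singleton _ _, ?_⟩
      intro z hz x' hx'
      rcases List.mem_singleton.mp hx' with rfl
      exact hml z hz x' (Or.inl (List.mem_cons_self ..))
    · intro z hz w hw
      rcases List.mem_append.mp hz with hzm | hzx
      · refine hml z hzm w ?_
        rcases hw with h | h
        · exact Or.inl (List.mem_cons_of_mem _ h)
        · exact Or.inr h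
      · rcases List.mem_singleton.mp hzx with rfl
        rcases hw with h | h
        · exact List.rel_of_pairwise_cons hl h
        · rcases List.mem_cons.mp h with rfl | h
          · exact hxy
          · exact le_trans hxy (List.rel_of_pairwise_cons hr h)
  | case2 x xs y ys m c hxy ih =>
    intro hl hr hm hml
    have hyx : y ≤ x := le_of_lt (lt_of_not_ge hxy)
    rw [mergeLoop, if_neg hxy]
    apply ih hl (List.Pairwise.of_cons hr)
    · refine List.pairwise_append.mpr ⟨hm, List.pairwise_singleton _ _, ?_⟩
      intro z hz y' hy'
      rcases List.mem_singleton.mp hy' with rfl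
      exact hml z hz y' (Or.inr (List.mem_cons_self ..))
    · intro z hz w hw
      rcases List.mem_append.mp hz with hzm | hzy
      · refine hml z hzm w ?_
        rcases hw with h | h
        · exact Or.inl h
        · exact Or.inr (List.mem_cons_of_mem _ h)
      · rcases List.mem_singleton.mp hzy with rfl
        rcases hw with h | h
        · rcases List.mem_cons.mp h with rfl | h
          · exact hyx
          · exact le_trans hyx (List.rel_of_pairwise_cons hl h)
        · exact List.rel_of_pairwise_cons hr h
  | case3 left right m c h =>
    intro hl hr hm hml
    rw [mergeLoop.eq_def]
    split
    · exact (h _ _ _ _ rfl rfl).elim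
    · refine List.pairwise_append.mpr ⟨List.pairwise_append.mpr ⟨hm, hl, ?_⟩, hr, ?_⟩
      · intro z hz w hw; exact hml z hz w (Or.inl hw)
      · intro z hz w hw
        rcases List.mem_append.mp hz with hzm | hzl
        · exact hml z hzm w (Or.inr hw)
        · -- z ∈ left and w ∈ right: one of left/right is empty, contradiction
          rcases left with _ | ⟨x, xs⟩
          · cases hzl
          · rcases right with _ | ⟨y, ys⟩
            · cases hw
            · exact (h _ _ _ _ rfl rfl).elim

theorem mergeLoop_count (l r m : List Int) (c : Int) :
    l.Pairwise (· ≤ ·) → r.Pairwise (· ≤ ·) →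
    (mergeLoop l r m c).2 = c + (crossCnt l r : Int) := by
  induction l, r, m, c using mergeLoop.induct with
  | case1 x xs y ys m c hxy ih =>
    intro hl hr
    rw [mergeLoop, if_pos hxy, ih (List.Pairwise.of_cons hl) hr]
    have h0 : (y :: ys).countP (fun z => decide (z < x)) = 0 := by
      refine List.countP_eq_zero.mpr ?_
      intro z hz
      rcases List.mem_cons.mp hz with rfl | h
      · simp; omega
      · have := List.rel_of_pairwise_cons hr h
        simp; omega
    rw [crossCnt_cons_left, h0]
    simp
  | case2 x xs y ys m c hxy ih =>
    intro hl hr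
    have hyx : y < x := lt_of_not_ge hxy
    rw [mergeLoop, if_neg hxy, ih hl (List.Pairwise.of_cons hr)]
    have h1 : (x :: xs).countP (fun z => decide (y < z)) = (x :: xs).length := by
      refine List.countP_eq_length.mpr ?_
      intro z hz
      rcases List.mem_cons.mp hz with rfl | h
      · simp; omega
      · have := List.rel_of_pairwise_cons hl h
        simp; omega
    rw [crossCnt_cons_right, h1]
    push_cast
    ring
  | case3 left right m c h =>
    intro hl hr
    rw [mergeLoop.eq_def]
    split
    · exact (h _ _ _ _ rfl rfl).elim
    · have h0 : crossCnt left right = 0 := by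
        rcases left with _ | ⟨x, xs⟩
        · exact crossCnt_nil_left _
        · rcases right with _ | ⟨y, ys⟩
          · exact crossCnt_nil_right _
          · exact (h _ _ _ _ rfl rfl).elim
      simp [h0]

theorem sortCount_spec (a : List Int) :
    (sortCount a).1.Perm a ∧ (sortCount a).1.Pairwise (· ≤ ·) ∧ (sortCount a).2 = (inv a : Int) := by
  induction a using sortCount.induct with
  | case1 a h =>
    rw [sortCount, dif_pos h]
    refine ⟨List.Perm.refl _, ?_, ?_⟩
    · rcases a with _ | ⟨x, _ | ⟨y, t⟩⟩
      · exact List.Pairwise.nil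
      · exact List.pairwise_singleton _ _
      · simp at h
    · rcases a with _ | ⟨x, _ | ⟨y, t⟩⟩
      · rfl
      · simp [inv]
      · simp at h
  | case2 a h mid ih1 ih2 =>
    obtain ⟨hp1, hs1, hc1⟩ := ih1
    obtain ⟨hp2, hs2, hc2⟩ := ih2
    have hmid : mid = a.length / 2 := rfl
    rw [sortCount, dif_neg h]
    simp only [← hmid]
    have hperm : (mergeLoop (sortCount (a.take mid)).1 (sortCount (a.drop mid)).1 [] 0).1.Perm a := by
      refine (mergeLoop_perm _ _ _ _).trans ?_
      simp only [List.nil_append]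
      exact (hp1.append hp2).trans (by rw [List.take_append_drop])
    refine ⟨hperm, ?_, ?_⟩
    · exact mergeLoop_sorted _ _ _ _ hs1 hs2 List.Pairwise.nil (by intro z hz; cases hz)
    · rw [mergeLoop_count _ _ _ _ hs1 hs2, hc1, hc2]
      have hcc : crossCnt (sortCount (a.take mid)).1 (sortCount (a.drop mid)).1
          = crossCnt (a.take mid) (a.drop mid) := by
        rw [crossCnt_perm_left hp1, crossCnt_perm_right _ hp2]
      have hinv : inv a = inv (a.take mid) + inv (a.drop mid) + crossCnt (a.take mid) (a.drop mid) := by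
        conv_lhs => rw [← List.take_append_drop mid a]
        exact inv_append _ _
      rw [hcc, hinv]
      push_cast
      ring

-- A's intersection test, for lines with y1 < y3, is exactly 'y4 < y2'
theorem isIntersect_of_lt (y1 y2 y3 y4 : Int) (h : y1 < y3) :
    isIntersect y1 y2 y3 y4 = decide (y4 < y2) := by
  unfold isIntersect
  by_cases hz : y4 < y2
  · have : (y1 - y3) * (y2 - y4) < 0 := mul_neg_of_neg_of_pos (by omega) (by omega)
    simp [hz]; omega
  · have : 0 ≤ (y1 - y3) * (y2 - y4) := by nlinarith [sq_nonneg (y1-y3)]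
    simp [hz]; omega

theorem foldl_count_pairs (l : List Int) (y2 : Int) (st : Int × Int) :
    l.foldl (fun s z => if decide (z < y2) = true then (s.1 + 1, s.2) else s) st
      = (st.1 + (l.countP (fun z => decide (z < y2)) : Int), st.2) := by
  induction l generalizing st with
  | nil => simp
  | cons z zs ih =>
    simp only [List.foldl_cons, List.countP_cons, ih]
    by_cases h : z < y2
    · simp [h]
      omega
    · simp [h]

theorem foldl_addfst (bs : List (List Int)) (p : Int → Bool) (st : Int × Int) :
    bs.foldl (fun s b => (s.1 + (b.countP p : Int), s.2)) st
      = (st.1 + (bs.flatten.countP p : Int), st.2) := by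
  induction bs generalizing st with
  | nil => simp
  | cons b bs ih =>
    rw [List.foldl_cons, ih, List.flatten_cons, List.countP_append, Prod.mk.injEq]
    refine ⟨by push_cast; ring, by ring⟩

-- the two innermost loops of A, for a fixed left end aNode = a and neighbour y2
theorem inner2 (L : List (List Int)) (a y2 : Int) (ha : 0 ≤ a) (st : Int × Int) :
    (PySem.List.pyRange (a + 1) (PySem.List.len L) 1).foldl (fun st4 o =>
        (PySem.List.pyGetD L o []).foldl (fun st5 z =>
          if isIntersect a y2 o z then (st5.1 + 1, st5.2) else st5) st4) st
      = (st.1 + (((L.drop (a + 1).toNat).flatten).countP (fun z => decide (z < y2)) : Int), st.2) := by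
  have step1 : (PySem.List.pyRange (a + 1) (PySem.List.len L) 1).foldl (fun st4 o =>
        (PySem.List.pyGetD L o []).foldl (fun st5 z =>
          if isIntersect a y2 o z then (st5.1 + 1, st5.2) else st5) st4) st
      = (PySem.List.pyRange (a + 1) (PySem.List.len L) 1).foldl (fun st4 o =>
        (st4.1 + ((PySem.List.pyGetD L o []).countP (fun z => decide (z < y2)) : Int), st4.2)) st := by
    refine PySem.List.foldl_congr_mem _ _ _ _ ?_
    intro acc o ho
    have hao : a < o := by
      have := (PySem.List.mem_pyRange_one.mp ho).1
      omega
    have hrw : ∀ (st5 : Int × Int) (z : Int),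
        (if isIntersect a y2 o z then (st5.1 + 1, st5.2) else st5)
          = (if decide (z < y2) = true then (st5.1 + 1, st5.2) else st5) := by
      intro st5 z
      rw [isIntersect_of_lt a y2 o z hao]
    calc (PySem.List.pyGetD L o []).foldl (fun st5 z =>
            if isIntersect a y2 o z then (st5.1 + 1, st5.2) else st5) acc
        = (PySem.List.pyGetD L o []).foldl (fun st5 z =>
            if decide (z < y2) = true then (st5.1 + 1, st5.2) else st5) acc := by
          refine PySem.List.foldl_congr_mem _ _ _ _ ?_
          intro acc' z _
          exact hrw acc' z
      _ = (acc.1 + ((PySem.List.pyGetD L o []).countP (fun z => decide (z < y2)) : Int), acc.2) :=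
          foldl_count_pairs _ _ _
  rw [step1]
  have h2 := PySem.List.foldl_pyRange_pyGetD (xs := L) (d := ([] : List Int))
    (f := fun (acc : Int × Int) (v : List Int) =>
      (acc.1 + (v.countP (fun z => decide (z < y2)) : Int), acc.2))
    (init := st) (a := a + 1) (by omega)
  rw [h2]
  exact foldl_addfst _ _ _

-- the middle loop of A: one whole block b at position a
theorem middleLoop (L : List (List Int)) (a : Int) (ha : 0 ≤ a) (b : List Int) (st : Int × Int) :
    b.foldl (fun st2 y2 =>
        (PySem.List.pyRange (a + 1) (PySem.List.len L) 1).foldl (fun st4 o =>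
          (PySem.List.pyGetD L o []).foldl (fun st5 z =>
            if isIntersect a y2 o z then (st5.1 + 1, st5.2) else st5) st4) (st2.1, st2.2 + 1)) st
      = (st.1 + (crossCnt b ((L.drop (a + 1).toNat).flatten) : Int), st.2 + (b.length : Int)) := by
  induction b generalizing st with
  | nil => simp [crossCnt_nil_left]
  | cons y2 b ih =>
    rw [List.foldl_cons, inner2 L a y2 ha, ih, crossCnt_cons_left, Prod.mk.injEq]
    refine ⟨by push_cast; ring, by simp [List.length_cons]; omega⟩

theorem foldl_pair_add (xs : List Int) (G H : Int → Int) (st : Int × Int) :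
    xs.foldl (fun s a => (s.1 + G a, s.2 + H a)) st
      = (st.1 + (xs.map G).sum, st.2 + (xs.map H).sum) := by
  induction xs generalizing st with
  | nil => simp
  | cons x xs ih =>
    rw [List.foldl_cons, ih, List.map_cons, List.map_cons, List.sum_cons, List.sum_cons, Prod.mk.injEq]
    refine ⟨by ring, by ring⟩

theorem sumG (L : List (List Int)) :
    ((List.range L.length).map (fun k =>
        (crossCnt (L.getD k []) ((L.drop (k + 1)).flatten) : Int))).sum = (refCount L : Int) := by
  induction L with
  | nil => simp [refCount]
  | cons b bs ih =>
    rw [List.length_cons, List.range_succ_eq_map]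
    simp only [List.map_cons, List.map_map, List.sum_cons]
    have hmap : (List.range bs.length).map ((fun k =>
          (crossCnt ((b :: bs).getD k []) (((b :: bs).drop (k + 1)).flatten) : Int)) ∘ Nat.succ)
        = (List.range bs.length).map (fun k =>
          (crossCnt (bs.getD k []) ((bs.drop (k + 1)).flatten) : Int)) := by
      refine List.map_congr_left ?_
      intro k _
      rfl
    rw [hmap, ih]
    simp [refCount]

theorem sumH (L : List (List Int)) :
    ((List.range L.length).map (fun k => ((L.getD k []).length : Int))).sum
      = (L.flatten.length : Int) := by
  induction L with
  | nil => simp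
  | cons b bs ih =>
    rw [List.length_cons, List.range_succ_eq_map]
    simp only [List.map_cons, List.map_map, List.sum_cons]
    have hmap : (List.range bs.length).map ((fun k => (((b :: bs).getD k []).length : Int)) ∘ Nat.succ)
        = (List.range bs.length).map (fun k => ((bs.getD k []).length : Int)) := by
      refine List.map_congr_left ?_
      intro k _
      rfl
    rw [hmap, ih]
    simp

theorem sum_pyRange_map (n : Nat) (G : Int → Int) (g : Nat → Int)
    (h : ∀ k : Nat, G (k : Int) = g k) :
    ((PySem.List.pyRange 0 (n : Int) 1).map G).sum = ((List.range n).map g).sum := by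
  rw [PySem.List.pyRange_one]
  have h0 : ((n : Int) - 0).toNat = n := by omega
  rw [h0, List.map_map]
  refine congrArg List.sum (List.map_congr_left ?_)
  intro k _
  simp only [Function.comp_apply, zero_add]
  exact h k

theorem A_eq_ref (adjListA : List (List Int)) :
    getIntersectionCountFromAdj adjListA = ((refCount adjListA : Int), (adjListA.flatten.length : Int)) := by
  unfold getIntersectionCountFromAdj
  have step1 : (PySem.List.pyRange 0 (PySem.List.len adjListA) 1).foldl (fun st1 aNode =>
        (PySem.List.pyGetD adjListA aNode []).foldl (fun st2 aNodeNeighbor =>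
          (PySem.List.pyRange (aNode + 1) (PySem.List.len adjListA) 1).foldl (fun st4 otherNode =>
            (PySem.List.pyGetD adjListA otherNode []).foldl (fun st5 otherNeighbor =>
              if isIntersect aNode aNodeNeighbor otherNode otherNeighbor then (st5.1 + 1, st5.2) else st5) st4)
            (st2.1, st2.2 + 1)) st1) ((0 : Int), (0 : Int))
      = (PySem.List.pyRange 0 (PySem.List.len adjListA) 1).foldl (fun st1 a =>
          (st1.1 + (crossCnt (PySem.List.pyGetD adjListA a []) ((adjListA.drop (a + 1).toNat).flatten) : Int),
           st1.2 + ((PySem.List.pyGetD adjListA a []).length : Int))) ((0 : Int), (0 : Int)) := by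
    refine PySem.List.foldl_congr_mem _ _ _ _ ?_
    intro acc a hmem
    have ha : 0 ≤ a := by
      have := (PySem.List.mem_pyRange_one.mp hmem).1
      omega
    exact middleLoop adjListA a ha _ acc
  show _ = ((refCount adjListA : Int), (adjListA.flatten.length : Int))
  rw [step1, foldl_pair_add]
  have e1 := sum_pyRange_map adjListA.length
    (fun a => (crossCnt (PySem.List.pyGetD adjListA a []) ((adjListA.drop (a + 1).toNat).flatten) : Int))
    (fun k => (crossCnt (adjListA.getD k []) ((adjListA.drop (k + 1)).flatten) : Int))
    (by
      intro k
      simp only [PySem.List.pyGetD_natCast]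
      have hk : ((k : Int) + 1).toNat = k + 1 := by omega
      rw [hk])
  have e2 := sum_pyRange_map adjListA.length
    (fun a => ((PySem.List.pyGetD adjListA a []).length : Int))
    (fun k => ((adjListA.getD k []).length : Int))
    (by
      intro k
      simp only [PySem.List.pyGetD_natCast])
  rw [PySem.List.len_eq] at *
  rw [e1, e2, sumG, sumH]
  simp

theorem inv_flatten (L : List (List Int)) :
    inv L.flatten = (L.map inv).sum + refCount L := by
  induction L with
  | nil => rfl
  | cons b bs ih =>
    rw [List.flatten_cons, inv_append, ih]
    simp [refCount]
    ring

theorem B_eq_ref (adjListA : List (List Int)) :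
    getIntersectionCountFromAdj_alt adjListA = ((refCount adjListA : Int), (adjListA.flatten.length : Int)) := by
  show ((sortCount (adjListA.flatMap (fun nb => nb))).2
      - (adjListA.map (fun nb => (sortCount nb).2)).sum,
      PySem.List.len (adjListA.flatMap (fun nb => nb)))
    = ((refCount adjListA : Int), (adjListA.flatten.length : Int))
  have hflat : adjListA.flatMap (fun nb => nb) = adjListA.flatten := by simp
  rw [hflat, (sortCount_spec adjListA.flatten).2.2]
  have hwithin : (adjListA.map (fun nb => (sortCount nb).2)).sum
      = ((adjListA.map inv).sum : Int) := by
    clear hflat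
    induction adjListA with
    | nil => rfl
    | cons b bs ih =>
      rw [List.map_cons, List.map_cons, List.sum_cons, List.sum_cons, ih, (sortCount_spec b).2.2]
      push_cast
      ring
  rw [hwithin, Prod.mk.injEq]
  constructor
  · rw [inv_flatten]
    push_cast
    ring
  · simp

-- ===== VERDICT (by name: the statement is the Claim_ definition above) =====
theorem getIntersectionCountFromAdj_spec : Claim_equal_getIntersectionCountFromAdj := by
  intro adjListA _
  unfold Spec_getIntersectionCountFromAdj
  rw [A_eq_ref, B_eq_ref]
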